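-- pv_equiv track=rewrite | github.com/JoeBek/IGVC-2023 | MultipleObstacleDetection.py | findCoordinatesOfCloseObstacles
-- ===== SOURCE A (Python) =====
-- OBSTACLE_AVOIDANCE_DEPTH_CM = 300  # distance (in cm) at which robot attempts to avoid obstacle
--
-- def findCoordinatesOfCloseObstacles(depth_list):
--     """
--     Gets x-coordinates of close obstacles. Pixels corresponding to different objects are separated into different lists.
--
--     :param depth_list: list of depth values corresponding to a horizontal line of pixels
--
--     :return: list of lists of x-coordinates of close obstacles (where each list entry corresponds to different objects)
--     """
--     obstacleDetected = False
--     listOfListsOfObstacleCoordinates = []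
--     listOfCurrentObstacleCoordinates = []
--
--     for depthListIndex in range(len(depth_list)):
--         currentDepth = depth_list[depthListIndex]
--
--         if obstacleDetected:
--             if currentDepth > OBSTACLE_AVOIDANCE_DEPTH_CM:
--                 assert len(listOfCurrentObstacleCoordinates) > 0  # TODO: delete later
--                 listOfListsOfObstacleCoordinates.append(listOfCurrentObstacleCoordinates)
--                 listOfCurrentObstacleCoordinates = []
--                 obstacleDetected = False
--             else:  # currentDepth <= MIN_DEPTH_TO_OBSTACLE
--                 listOfCurrentObstacleCoordinates.append(depthListIndex)
--         else:  # not obstacleDetected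
--             if currentDepth <= OBSTACLE_AVOIDANCE_DEPTH_CM:
--                 assert len(listOfCurrentObstacleCoordinates) == 0  # TODO: delete later
--                 listOfCurrentObstacleCoordinates.append(depthListIndex)
--                 obstacleDetected = True
--
--     # adds last remaining obstacle, if any
--     if obstacleDetected:
--         assert len(listOfCurrentObstacleCoordinates) > 0  # TODO: delete later
--         listOfListsOfObstacleCoordinates.append(listOfCurrentObstacleCoordinates)
--
--     return listOfListsOfObstacleCoordinates
-- ===== SOURCE B (Python) =====
-- OBSTACLE_AVOIDANCE_DEPTH_CM = 300  # distance (in cm) at which robot attempts to avoid obstacle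
--
-- def findCoordinatesOfCloseObstacles(depth_list):
--     """Two-pointer run scan: find each maximal run of close depths and emit its index range."""
--     n = len(depth_list)
--     result = []
--     i = 0
--     while i < n:
--         if depth_list[i] <= OBSTACLE_AVOIDANCE_DEPTH_CM:
--             j = i
--             while j < n and depth_list[j] <= OBSTACLE_AVOIDANCE_DEPTH_CM:
--                 j += 1
--             result.append(list(range(i, j)))
--             i = j
--         else:
--             i += 1
--     return result
-- ===== Notes on version B (the rewrite author's own statement) =====
-- stated objective: alternative
-- what changed: Replaced the boolean state-machine fold (obstacleDetected flag plus a mutable current-run accumulator and trailing flush) by a two-pointer scan that finds each maximal run of close depths and emits list(range(i, j)) directly.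
import Mathlib
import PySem

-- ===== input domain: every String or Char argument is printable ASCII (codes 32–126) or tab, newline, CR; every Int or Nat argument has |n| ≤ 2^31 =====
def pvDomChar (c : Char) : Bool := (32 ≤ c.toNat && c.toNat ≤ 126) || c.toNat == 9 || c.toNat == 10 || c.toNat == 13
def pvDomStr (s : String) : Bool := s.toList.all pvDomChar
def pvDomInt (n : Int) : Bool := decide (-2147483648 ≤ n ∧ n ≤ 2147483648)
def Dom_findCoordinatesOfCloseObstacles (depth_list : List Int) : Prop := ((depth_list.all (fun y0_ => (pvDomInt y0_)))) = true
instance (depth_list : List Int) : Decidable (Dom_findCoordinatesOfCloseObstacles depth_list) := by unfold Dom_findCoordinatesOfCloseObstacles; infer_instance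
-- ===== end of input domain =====

-- B replaces A's boolean state-machine fold by a two-pointer maximal-run scan (alternative decomposition, same O(n) cost).

def OBSTACLE_AVOIDANCE_DEPTH_CM : Int := 300

-- ===== PORT A =====
-- one loop iteration of A: state = (obstacleDetected, listOfLists, currentList), input = (index, depth)
def pvStepA (st : Bool × List (List Int) × List Int) (p : Int × Int) :
    Bool × List (List Int) × List Int :=
  let (det, acc, cur) := st
  if det then
    if p.2 > OBSTACLE_AVOIDANCE_DEPTH_CM then (false, acc ++ [cur], [])
    else (true, acc, cur ++ [p.1])
  else
    if p.2 ≤ OBSTACLE_AVOIDANCE_DEPTH_CM then (true, acc, cur ++ [p.1])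
    else (false, acc, cur)

def findCoordinatesOfCloseObstacles (depth_list : List Int) : List (List Int) :=
  -- for depthListIndex in range(len(depth_list)): currentDepth = depth_list[depthListIndex]
  let st := (PySem.List.enumerate depth_list).foldl pvStepA (false, [], [])
  -- adds last remaining obstacle, if any
  if st.1 then st.2.1 ++ [st.2.2] else st.2.1

-- ===== PORT B =====
-- inner while: number of consecutive close depths at the front of the suffix (j - i in Source B)
def pvSkim : List Int → Nat
  | [] => 0
  | d :: rest => if d ≤ OBSTACLE_AVOIDANCE_DEPTH_CM then pvSkim rest + 1 else 0

-- outer while over the suffix starting at absolute index i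
def pvRuns (l : List Int) (i : Int) : List (List Int) :=
  match l with
  | [] => []
  | d :: rest =>
    if _h : d ≤ OBSTACLE_AVOIDANCE_DEPTH_CM then
      let k := pvSkim (d :: rest)
      PySem.List.pyRange i (i + k) 1 :: pvRuns ((d :: rest).drop k) (i + k)
    else pvRuns rest (i + 1)
termination_by l.length
decreasing_by
  · simp only [pvSkim, _h, if_pos, List.drop_succ_cons, List.length_drop, List.length_cons]
    omega
  · simp

def findCoordinatesOfCloseObstacles_alt (depth_list : List Int) : List (List Int) :=
  pvRuns depth_list 0

-- ===== PRECONDITION & SPEC =====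
def Spec_findCoordinatesOfCloseObstacles (depth_list : List Int) (out : List (List Int)) : Prop := out = findCoordinatesOfCloseObstacles_alt depth_list
instance (depth_list : List Int) (out : List (List Int)) : Decidable (Spec_findCoordinatesOfCloseObstacles depth_list out) := by unfold Spec_findCoordinatesOfCloseObstacles; infer_instance

-- ===== CLAIM (what is proved, stated in full; the proofs are below) =====
def Claim_equal_findCoordinatesOfCloseObstacles : Prop := ∀ (depth_list : List Int), Dom_findCoordinatesOfCloseObstacles depth_list → Spec_findCoordinatesOfCloseObstacles depth_list (findCoordinatesOfCloseObstacles depth_list)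

-- ===== LEMMAS AND PROOFS =====

def pvFinish (st : Bool × List (List Int) × List Int) : List (List Int) :=
  if st.1 then st.2.1 ++ [st.2.2] else st.2.1

theorem pvSkim_pos (d : Int) (rest : List Int) (h : d ≤ OBSTACLE_AVOIDANCE_DEPTH_CM) :
    pvSkim (d :: rest) = pvSkim rest + 1 := by simp [pvSkim, h]

theorem pvSkim_neg (d : Int) (rest : List Int) (h : ¬ d ≤ OBSTACLE_AVOIDANCE_DEPTH_CM) :
    pvSkim (d :: rest) = 0 := by simp [pvSkim, h]

theorem pvRuns_pos (d : Int) (rest : List Int) (i : Int) (h : d ≤ OBSTACLE_AVOIDANCE_DEPTH_CM) :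
    pvRuns (d :: rest) i =
      PySem.List.pyRange i (i + pvSkim (d :: rest)) 1 ::
        pvRuns ((d :: rest).drop (pvSkim (d :: rest))) (i + pvSkim (d :: rest)) := by
  rw [pvRuns.eq_def]
  simp only [dif_pos h]

theorem pvRuns_neg (d : Int) (rest : List Int) (i : Int) (h : ¬ d ≤ OBSTACLE_AVOIDANCE_DEPTH_CM) :
    pvRuns (d :: rest) i = pvRuns rest (i + 1) := by
  rw [pvRuns.eq_def]
  simp only [dif_neg h]

-- main invariant: A's fold over the enumerated suffix, started in either state, yields B's runs
theorem pvMain (l : List Int) :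
    (∀ (i : Int) (acc : List (List Int)) (cur : List Int),
        pvFinish ((PySem.List.enumerate l i).foldl pvStepA (true, acc, cur)) =
          acc ++ (cur ++ PySem.List.pyRange i (i + pvSkim l) 1) ::
            pvRuns (l.drop (pvSkim l)) (i + pvSkim l))
    ∧ (∀ (i : Int) (acc : List (List Int)),
        pvFinish ((PySem.List.enumerate l i).foldl pvStepA (false, acc, [])) =
          acc ++ pvRuns l i) := by
  induction l with
  | nil =>
    constructor
    · intro i acc cur
      simp [PySem.List.enumerate, pvFinish, pvSkim, pvRuns, PySem.List.pyRange_one_eq_nil]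
    · intro i acc
      simp [PySem.List.enumerate, pvFinish, pvRuns]
  | cons d rest ih =>
    obtain ⟨ihT, ihF⟩ := ih
    have hcast : ∀ j : Int, j + ((pvSkim rest + 1 : Nat) : Int) = (j + 1) + (pvSkim rest : Nat) := by
      intro j; push_cast; ring
    have hrange : ∀ j : Int, PySem.List.pyRange j (j + ((pvSkim rest + 1 : Nat) : Int)) 1 =
        j :: PySem.List.pyRange (j + 1) ((j + 1) + (pvSkim rest : Nat)) 1 := by
      intro j
      rw [hcast j, PySem.List.pyRange_one_cons (by omega)]
    constructor
    · intro i acc cur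
      by_cases h : d ≤ OBSTACLE_AVOIDANCE_DEPTH_CM
      · have hstep : pvStepA (true, acc, cur) (i, d) = (true, acc, cur ++ [i]) := by
          simp [pvStepA, not_lt.mpr h]
        rw [PySem.List.enumerate_cons, List.foldl_cons, hstep, ihT, pvSkim_pos d rest h,
          List.drop_succ_cons, hrange i, hcast i]
        simp
      · have hstep : pvStepA (true, acc, cur) (i, d) = (false, acc ++ [cur], []) := by
          simp [pvStepA, lt_of_not_ge h]
        rw [PySem.List.enumerate_cons, List.foldl_cons, hstep, ihF, pvSkim_neg d rest h]
        simp [pvRuns_neg d rest i h, PySem.List.pyRange_one_eq_nil]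
    · intro i acc
      by_cases h : d ≤ OBSTACLE_AVOIDANCE_DEPTH_CM
      · have hstep : pvStepA (false, acc, []) (i, d) = (true, acc, [i]) := by
          simp [pvStepA, h]
        rw [PySem.List.enumerate_cons, List.foldl_cons, hstep, ihT, pvRuns_pos d rest i h,
          pvSkim_pos d rest h, List.drop_succ_cons, hrange i, hcast i]
        simp
      · have hstep : pvStepA (false, acc, []) (i, d) = (false, acc, []) := by
          simp [pvStepA, h]
        rw [PySem.List.enumerate_cons, List.foldl_cons, hstep, ihF, pvRuns_neg d rest i h]

-- ===== VERDICT (by name: the statement is the Claim_ definition above) =====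
theorem findCoordinatesOfCloseObstacles_spec : Claim_equal_findCoordinatesOfCloseObstacles := by
  intro l _
  unfold Spec_findCoordinatesOfCloseObstacles findCoordinatesOfCloseObstacles
    findCoordinatesOfCloseObstacles_alt
  have := (pvMain l).2 0 []
  simpa [pvFinish] using this
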